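-- pv_equiv track=rewrite | github.com/NIckmin96/algos | 프로그래머스/2/17686. ［3차］ 파일명 정렬/［3차］ 파일명 정렬.py | solution
-- ===== SOURCE A (Python) =====
-- def solution(files):
--     answer = []
--     from collections import deque
--     for i,file in enumerate(files):
--         head = ''
--         number = ''
--         tail = ''
--         file_name = deque(list(file))
--         # head
--         while file_name:
--             if file_name[0].isdigit():
--                 break
--             else:
--                 head += file_name.popleft()
--         # number
--         while file_name:
--             if file_name[0].isdigit():
--                 number+=file_name.popleft()
--             else:
--                 break
--         # tail
--         tail = ('').join(file_name)
--         head = head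
--         number = number
--         tail = tail
--         answer.append((head,number,tail,i))
--
--     answer.sort(key=lambda x:(x[0].lower(),int(x[1]),i))
--     answer = list(map(lambda x:('').join(x[:-1]),answer))
--
--     return answer
-- ===== SOURCE B (Python) =====
-- def solution(files):
--     # sort the filenames directly: the key (head.lower(), int(number)) is parsed
--     # with two index scans; head+number+tail == file, so no tuple rebuild/join needed
--     def key(f):
--         i = 0
--         while i < len(f) and not f[i].isdigit():
--             i += 1
--         j = i
--         while j < len(f) and f[j].isdigit():
--             j += 1
--         return (f[:i].lower(), int(f[i:j]))
--     return sorted(files, key=key)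
-- ===== Notes on version B (the rewrite author's own statement) =====
-- stated objective: idiomatic
-- what changed: B drops A's deque-popping tokenizer and tuple-rebuild-then-join pipeline entirely: it sorts the filename strings themselves with sorted(files, key=...) where the key (head.lower(), int(number)) is computed by two index scans, relying on head+number+tail == file so no (head,number,tail,i) tuples are built and no join is needed.
import Mathlib
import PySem

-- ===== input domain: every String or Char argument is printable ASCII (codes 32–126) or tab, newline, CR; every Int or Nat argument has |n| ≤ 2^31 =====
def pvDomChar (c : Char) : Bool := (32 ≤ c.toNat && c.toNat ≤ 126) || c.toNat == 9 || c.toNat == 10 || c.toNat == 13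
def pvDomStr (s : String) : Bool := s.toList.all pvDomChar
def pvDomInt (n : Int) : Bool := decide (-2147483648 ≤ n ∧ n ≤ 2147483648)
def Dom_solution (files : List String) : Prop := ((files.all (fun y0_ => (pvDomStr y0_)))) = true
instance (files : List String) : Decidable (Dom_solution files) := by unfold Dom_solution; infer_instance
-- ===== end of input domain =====

-- B sorts the filename strings directly by (head.lower(), int(number)), parsing the key
-- with two index scans instead of A's deque tokenizer + tuple rebuild + join. Return-value
-- equivalence only (A mutates no argument; it builds its own list).

-- ===== PORT A =====
-- the 'while file_name: if file_name[0].isdigit(): break else: head += popleft()' loop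
def aPopHead : List Char → List Char × List Char
  | [] => ([], [])
  | c :: rest =>
      if PySem.Chars.isdigit c then ([], c :: rest)
      else
        let p := aPopHead rest
        (c :: p.1, p.2)

-- the 'while file_name: if file_name[0].isdigit(): number += popleft() else: break' loop
def aPopNum : List Char → List Char × List Char
  | [] => ([], [])
  | c :: rest =>
      if PySem.Chars.isdigit c then
        let p := aPopNum rest
        (c :: p.1, p.2)
      else ([], c :: rest)

def solution (files : List String) : List String :=
  let answer : List (List Char × List Char × List Char × Int) :=
    (PySem.List.enumerate files).foldl (fun acc p =>
      let file_name := p.2.toList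
      let hr := aPopHead file_name
      let nt := aPopNum hr.2
      acc ++ [(hr.1, nt.1, nt.2, p.1)]) []
  -- answer.sort(key=lambda x:(x[0].lower(), int(x[1]), i)): the third component is the
  -- leaked loop variable i, the SAME constant for every element, so it affects no
  -- comparison; the sort is the stable lexicographic sort on the two varying components.
  -- int('') raises ValueError in Python: Pre_solution excludes digitless filenames.
  let answer :=
    PySem.List.sorted2 answer
      (fun x => PySem.Chars.lower x.1)
      (fun x => (PySem.Int.ofChars? x.2.1).getD 0)
  answer.map (fun x => String.ofList (x.1 ++ x.2.1 ++ x.2.2.1))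

-- ===== PORT B =====
-- B's two index-scan while loops: f[:i] with i the first-digit index is the not-digit
-- prefix, f[i:j] the following digit run
def bHead (cs : List Char) : List Char := cs.takeWhile (fun c => !PySem.Chars.isdigit c)
def bNum (cs : List Char) : List Char :=
  (cs.dropWhile (fun c => !PySem.Chars.isdigit c)).takeWhile PySem.Chars.isdigit

def solution_alt (files : List String) : List String :=
  PySem.List.sorted2 files
    (fun f => PySem.Chars.lower (bHead f.toList))
    (fun f => (PySem.Int.ofChars? (bNum f.toList)).getD 0)

-- ===== PRECONDITION & SPEC =====
-- Pre_ excludes filenames containing no decimal digit: there A (and B) raise ValueError at int('').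
def Pre_solution (files : List String) : Prop :=
  ∀ f ∈ files, f.toList.any PySem.Chars.isdigit = true
instance (files : List String) : Decidable (Pre_solution files) := by
  unfold Pre_solution; infer_instance
def pvWitness_solution : List String := ["img12.png", "IMG10.PNG", "F-5.gif", "img2.JPG"]

def Spec_solution (files : List String) (out : List String) : Prop := out = solution_alt files
instance (files : List String) (out : List String) : Decidable (Spec_solution files out) := by
  unfold Spec_solution; infer_instance

-- ===== CLAIM (what is proved, stated in full; the proofs are below) =====
def Claim_equal_solution : Prop :=
  ∀ (files : List String), Dom_solution files → Pre_solution files →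
    Spec_solution files (solution files)

-- ===== LEMMAS AND PROOFS =====
theorem aPopHead_eq (cs : List Char) :
    aPopHead cs = (cs.takeWhile (fun c => !PySem.Chars.isdigit c),
                   cs.dropWhile (fun c => !PySem.Chars.isdigit c)) := by
  induction cs with
  | nil => rfl
  | cons c rest ih =>
      simp only [aPopHead, List.takeWhile, List.dropWhile, ih]
      by_cases h : PySem.Chars.isdigit c <;> simp [h]

theorem aPopNum_eq (cs : List Char) :
    aPopNum cs = (cs.takeWhile PySem.Chars.isdigit, cs.dropWhile PySem.Chars.isdigit) := by
  induction cs with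
  | nil => rfl
  | cons c rest ih =>
      simp only [aPopNum, List.takeWhile, List.dropWhile, ih]
      by_cases h : PySem.Chars.isdigit c <;> simp [h]

theorem insertBy_map {α β : Type} (h : β → α) (before : α → α → Bool) (x : β) (l : List β) :
    PySem.List.insertBy before (h x) (l.map h)
      = (PySem.List.insertBy (fun a b => before (h a) (h b)) x l).map h := by
  induction l with
  | nil => rfl
  | cons y ys ih =>
      simp only [List.map, PySem.List.insertBy]
      by_cases hb : before (h x) (h y) <;> simp [hb, ih]

theorem sorted2_map {α κ₁ κ₂ β : Type} [LT κ₁] [DecidableLT κ₁] [LT κ₂] [DecidableLT κ₂]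
    (xs : List β) (h : β → α) (k1 : α → κ₁) (k2 : α → κ₂) :
    PySem.List.sorted2 (xs.map h) k1 k2
      = (PySem.List.sorted2 xs (fun x => k1 (h x)) (fun x => k2 (h x))).map h := by
  simp only [PySem.List.sorted2]
  suffices H : ∀ acc : List β,
      (xs.map h).foldl
          (fun acc x => PySem.List.insertBy
            (fun a b => decide (k1 a < k1 b) || !decide (k1 b < k1 a) && decide (k2 a < k2 b)) x acc)
          (acc.map h)
        = (xs.foldl
            (fun acc x => PySem.List.insertBy
              (fun a b => decide (k1 (h a) < k1 (h b)) ||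
                !decide (k1 (h b) < k1 (h a)) && decide (k2 (h a) < k2 (h b))) x acc)
            acc).map h by
    simpa using H []
  induction xs with
  | nil => intro acc; rfl
  | cons x rest ih =>
      intro acc
      simp only [List.map, List.foldl]
      rw [insertBy_map h
        (fun a b => decide (k1 a < k1 b) || !decide (k1 b < k1 a) && decide (k2 a < k2 b)) x acc]
      exact ih _

-- A's parse of file f produces exactly B's head/number and the leftover tail
theorem parse_eq (f : String) :
    (aPopHead f.toList).1 = bHead f.toList ∧
    (aPopNum (aPopHead f.toList).2).1 = bNum f.toList ∧
    (aPopHead f.toList).1 ++ (aPopNum (aPopHead f.toList).2).1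
        ++ (aPopNum (aPopHead f.toList).2).2 = f.toList := by
  refine ⟨?_, ?_, ?_⟩
  · simp [aPopHead_eq, bHead]
  · simp [aPopHead_eq, aPopNum_eq, bNum]
  · simp [aPopHead_eq, aPopNum_eq, List.takeWhile_append_dropWhile]

-- ===== VERDICT (by name: the statement is the Claim_ definition above) =====
theorem solution_spec : Claim_equal_solution := by
  intro files _ _
  show solution files = solution_alt files
  simp only [solution, solution_alt]
  rw [PySem.List.foldl_append_singleton_eq_map
    (f := fun p : Int × String => ((aPopHead p.2.toList).1,
                    (aPopNum (aPopHead p.2.toList).2).1,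
                    (aPopNum (aPopHead p.2.toList).2).2, p.1))]
  simp only [List.nil_append]
  rw [sorted2_map]
  conv_rhs => rw [← PySem.List.map_snd_enumerate files 0, sorted2_map]
  rw [List.map_map]
  have hk : PySem.List.sorted2 (PySem.List.enumerate files)
        (fun p : Int × String => PySem.Chars.lower (aPopHead p.2.toList).1)
        (fun p : Int × String =>
          (PySem.Int.ofChars? (aPopNum (aPopHead p.2.toList).2).1).getD 0)
      = PySem.List.sorted2 (PySem.List.enumerate files)
        (fun p : Int × String => PySem.Chars.lower (bHead p.2.toList))
        (fun p : Int × String => (PySem.Int.ofChars? (bNum p.2.toList)).getD 0) := by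
    have h1 : (fun p : Int × String => PySem.Chars.lower (aPopHead p.2.toList).1)
        = fun p : Int × String => PySem.Chars.lower (bHead p.2.toList) := by
      funext p; rw [(parse_eq p.2).1]
    have h2 : (fun p : Int × String =>
          (PySem.Int.ofChars? (aPopNum (aPopHead p.2.toList).2).1).getD 0)
        = fun p : Int × String => (PySem.Int.ofChars? (bNum p.2.toList)).getD 0 := by
      funext p; rw [(parse_eq p.2).2.1]
    rw [h1, h2]
  have hj : ((fun x : List Char × List Char × List Char × Int =>
          String.ofList (x.1 ++ x.2.1 ++ x.2.2.1)) ∘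
        fun p : Int × String => ((aPopHead p.2.toList).1,
          (aPopNum (aPopHead p.2.toList).2).1,
          (aPopNum (aPopHead p.2.toList).2).2, p.1))
      = fun p : Int × String => p.2 := by
    funext p
    have h3 := (parse_eq p.2).2.2
    simp only [Function.comp]
    rw [List.append_assoc] at h3 ⊢
    rw [h3, String.ofList_toList]
  simp only [hk]
  rw [hj]
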